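-- pv_equiv track=rewrite | github.com/pypi-data/pypi-mirror-252 | packages/py-linq-sql/py_linq_sql-1.11.0.1.tar.gz/py_linq_sql-1.11.0.1/py_linq_sql/utils/functions/other_functions.py | _fix_same_column_name
-- ===== SOURCE A (Python) =====
-- from typing import Any, Dict, List, Tuple
--
-- def _fix_same_column_name(names: List[str]) -> List[str]:
--     """
--     Fix names of columns.
--
--     If we have column with the same name, suffix column with '__n'.
--
--     Args:
--         names: Columns name.
--
--     Returns:
--         Columns name suffixed if it necessary.
--
--     Examples:
--         >>> _fix_same_column_name(['toto', 'titi', 'toto', 'tutu', '8_add_titi'])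
--         ['toto', 'titi', 'toto__1', 'tutu', '_8_add_titi']
--     """
--     result = []
--     tmp_dict = {name: 0 for name in names}
--
--     for name in names:
--         new_name = f"{name}__{tmp_dict[name]}" if tmp_dict[name] > 0 else name
--         result.append(new_name if new_name[0].isalpha() else f"_{new_name}")
--         tmp_dict[name] += 1
--
--     return result
-- ===== SOURCE B (Python) =====
-- from typing import Any, Dict, List, Tuple
--
-- def _fix_same_column_name(names: List[str]) -> List[str]:
--     """Group indices by name, then scatter decorated names back by position."""
--     positions: Dict[str, List[int]] = {}
--     for i, name in enumerate(names):
--         positions.setdefault(name, []).append(i)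
--
--     result = [""] * len(names)
--     for name, idxs in positions.items():
--         prefix = "" if name[0].isalpha() else "_"
--         for occ, i in enumerate(idxs):
--             result[i] = prefix + (name if occ == 0 else f"{name}__{occ}")
--     return result
-- ===== Notes on version B (the rewrite author's own statement) =====
-- stated objective: alternative
-- what changed: A makes one forward sweep keeping a running per-name counter dict; B first groups the indices of each name into per-name position lists (one pass over enumerate(names)), then scatters the decorated names (0-th occurrence plain, later ones suffixed with __occ, '_' prepended when the first char is not alphabetic) back into a preallocated result at their original indices.
import Mathlib
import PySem

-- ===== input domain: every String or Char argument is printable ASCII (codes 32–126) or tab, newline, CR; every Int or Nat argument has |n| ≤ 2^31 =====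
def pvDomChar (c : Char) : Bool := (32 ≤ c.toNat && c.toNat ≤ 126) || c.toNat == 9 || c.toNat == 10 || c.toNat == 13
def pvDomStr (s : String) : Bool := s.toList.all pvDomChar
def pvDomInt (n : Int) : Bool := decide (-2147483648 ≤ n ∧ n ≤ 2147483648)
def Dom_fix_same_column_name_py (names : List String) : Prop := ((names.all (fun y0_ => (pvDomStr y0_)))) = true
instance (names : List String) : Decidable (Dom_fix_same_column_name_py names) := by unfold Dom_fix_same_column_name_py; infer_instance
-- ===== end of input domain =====

-- B replaces A's forward sweep with a running per-name counter dict by a grouping pass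
-- (name -> list of its indices) followed by a scatter of the decorated names back to their
-- original positions (alternative decomposition, same asymptotic cost).

-- ===== PORT A =====
-- the body of A's 'for name in names' loop (result/tmp_dict are the fold state)
def pvStepA (st : List String × PySem.Dict String Int) (name : String) :
    List String × PySem.Dict String Int :=
  let cnt := st.2.getD name 0   -- tmp_dict[name]; exact: every name is a key of the comprehension below
  let new_name := if cnt > 0 then name ++ "__" ++ PySem.Int.toStr cnt else name
  let decorated :=
    match PySem.Str.pyGet? new_name 0 with
    | some c => if PySem.Chars.isalpha c then new_name else "_" ++ new_name
    | none => new_name           -- new_name[0] raises IndexError in Python; excluded by Pre_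
  (st.1 ++ [decorated], st.2.insert name (cnt + 1))

def fix_same_column_name_py (names : List String) : List String :=
  let tmp_dict : PySem.Dict String Int :=
    names.foldl (fun d name => d.insert name 0) PySem.Dict.empty   -- {name: 0 for name in names}
  (names.foldl pvStepA ([], tmp_dict)).1

-- ===== PORT B =====
def fix_same_column_name_py_alt (names : List String) : List String :=
  let positions : PySem.Dict String (List Int) :=
    (PySem.List.enumerate names).foldl
      (fun d p => d.modify p.2 [] (· ++ [p.1])) PySem.Dict.empty
  let result0 : List String := List.replicate names.length ""      -- [""] * len(names)
  positions.items.foldl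
    (fun result q =>
      let pre :=
        match PySem.Str.pyGet? q.1 0 with
        | some c => if PySem.Chars.isalpha c then "" else "_"
        | none => ""             -- name[0] raises IndexError in Python; excluded by Pre_
      (PySem.List.enumerate q.2).foldl
        (fun r z =>
          -- result[i] = ... : i from enumerate(names) is a valid Nat index, so List.set is exact
          r.set z.2.toNat (pre ++ (if z.1 == 0 then q.1 else q.1 ++ "__" ++ PySem.Int.toStr z.1)))
        result)
    result0

-- ===== PRECONDITION & SPEC =====
-- Pre_ excludes lists containing the empty string: there 'name[0]' raises IndexError (in A and in B).
def Pre_fix_same_column_name_py (names : List String) : Prop := ∀ n ∈ names, n ≠ ""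
instance (names : List String) : Decidable (Pre_fix_same_column_name_py names) := by
  unfold Pre_fix_same_column_name_py; infer_instance

def pvWitness_fix_same_column_name_py : List String :=
  ["toto", "titi", "toto", "tutu", "8_add_titi"]

def Spec_fix_same_column_name_py (names : List String) (out : List String) : Prop := out = fix_same_column_name_py_alt names
instance (names : List String) (out : List String) : Decidable (Spec_fix_same_column_name_py names out) := by unfold Spec_fix_same_column_name_py; infer_instance

-- ===== CLAIM (what is proved, stated in full; the proofs are below) =====
def Claim_equal_fix_same_column_name_py : Prop := ∀ (names : List String), Dom_fix_same_column_name_py names → Pre_fix_same_column_name_py names → Spec_fix_same_column_name_py names (fix_same_column_name_py names)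

-- ===== LEMMAS AND PROOFS =====

-- the decorated name of the k-th occurrence (B's shape: prefix chosen from name's first char)
def pvDec (name : String) (k : Int) : String :=
  (match PySem.Str.pyGet? name 0 with
   | some c => if PySem.Chars.isalpha c then "" else "_"
   | none => "") ++
  (if k == 0 then name else name ++ "__" ++ PySem.Int.toStr k)

-- the intended j-th output element
def pvF (names : List String) (j : Nat) : String :=
  pvDec (names.getD j "") (((names.take j).count (names.getD j "") : Nat) : Int)

-- A's remaining output given the already-processed prefix
def pvGspec (pref : List String) : List String → List String
  | [] => []
  | n :: t => pvDec n ((pref.count n : Nat) : Int) :: pvGspec (pref ++ [n]) t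

-- the index list B's grouping pass stores for each name
def pvIdxs (names : List String) (name : String) : List Int :=
  ((((PySem.List.enumerate names).map (fun p => (p.2, p.1))).filter
      (fun q => q.1 == name)).map (·.2))

lemma pv_pyGet?_append_zero (a b : String) (ha : a ≠ "") :
    PySem.Str.pyGet? (a ++ b) 0 = PySem.Str.pyGet? a 0 := by
  have h : a.toList ≠ [] := by simp [ha]
  have hl : 0 < a.toList.length := List.length_pos_iff.mpr h
  simp [pysem]
  rw [List.getElem?_append_left hl]

lemma pv_stepA_out (st : List String × PySem.Dict String Int) (n : String) (hn : n ≠ "")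
    (k : Nat) (hk : st.2.getD n 0 = (k : Int)) :
    (pvStepA st n).1 = st.1 ++ [pvDec n (k : Int)] := by
  unfold pvStepA pvDec
  simp only [hk]
  cases k with
  | zero =>
    simp only [Int.natCast_zero, lt_irrefl]
    cases hc : PySem.List.pyGet? n.toList 0 with
    | none => simp [PySem.Chars.pyGet?_eq_listPyGet?, hc]
    | some c => by_cases ha : PySem.Chars.isalpha c <;> simp [PySem.Chars.pyGet?_eq_listPyGet?, hc, ha]
  | succ m =>
    have hpos : ((m+1 : Nat) : Int) > 0 := by positivity
    have hne : ((m+1 : Nat) : Int) ≠ 0 := by omega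
    have hget : PySem.Str.pyGet? (n ++ "__" ++ PySem.Int.toStr ((m+1 : Nat) : Int)) 0
        = PySem.Str.pyGet? n 0 := by
      rw [String.append_assoc]
      exact pv_pyGet?_append_zero _ _ hn
    simp only [if_pos hpos, hget, beq_iff_eq, if_neg hne]
    cases hc : PySem.List.pyGet? n.toList 0 with
    | none => simp [PySem.Chars.pyGet?_eq_listPyGet?, hc]
    | some c => by_cases ha : PySem.Chars.isalpha c <;> simp [PySem.Chars.pyGet?_eq_listPyGet?, hc, ha]

lemma pv_init_getD : ∀ (l : List String) (d : PySem.Dict String Int),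
    (∀ n, d.getD n 0 = 0) → ∀ n,
    (l.foldl (fun d name => d.insert name 0) d).getD n 0 = 0 := by
  intro l
  induction l with
  | nil => intro d h n; exact h n
  | cons x t ih =>
    intro d h n
    refine ih _ (fun m => ?_) n
    rw [PySem.Dict.getD_insert]
    split <;> simp [h]

lemma pv_A_loop : ∀ (l : List String) (acc : List String) (d : PySem.Dict String Int)
    (pref : List String),
    (∀ n, d.getD n 0 = ((pref.count n : Nat) : Int)) → (∀ n ∈ l, n ≠ "") →
    (l.foldl pvStepA (acc, d)).1 = acc ++ pvGspec pref l := by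
  intro l
  induction l with
  | nil => intro acc d pref _ _; simp [pvGspec]
  | cons n t ih =>
    intro acc d pref hd hne
    have hn : n ≠ "" := hne n (by simp)
    have hout : (pvStepA (acc, d) n).1 = acc ++ [pvDec n ((pref.count n : Nat) : Int)] :=
      pv_stepA_out (acc, d) n hn (pref.count n) (hd n)
    have hst : pvStepA (acc, d) n =
        (acc ++ [pvDec n ((pref.count n : Nat) : Int)], d.insert n (d.getD n 0 + 1)) := by
      refine Prod.ext ?_ rfl
      simpa using hout
    rw [List.foldl_cons, hst,
      ih _ _ (pref ++ [n]) (fun m => ?_) (fun m hm => hne m (by simp [hm]))]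
    · simp [pvGspec]
    · rw [PySem.Dict.getD_insert]
      split
      · next heq => subst heq; rw [hd m]; push_cast [List.count_append, List.count_singleton_self]; ring
      · next hne2 =>
          rw [hd m]
          have : List.count m [n] = 0 := by simp [Ne.symm hne2]
          simp [List.count_append, this]

lemma pv_A_eq_gspec (names : List String) (h : ∀ n ∈ names, n ≠ "") :
    fix_same_column_name_py names = pvGspec [] names := by
  unfold fix_same_column_name_py
  exact pv_A_loop names [] _ [] (fun n => by
    simp [pv_init_getD names PySem.Dict.empty (fun m => PySem.Dict.getD_empty m 0) n]) h

lemma pv_gspec_length : ∀ (l pref : List String), (pvGspec pref l).length = l.length := by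
  intro l
  induction l with
  | nil => intro pref; rfl
  | cons n t ih => intro pref; simp [pvGspec, ih]

lemma pv_gspec_getElem? : ∀ (l : List String) (pref : List String) (j : Nat), j < l.length →
    (pvGspec pref l)[j]? =
      some (pvDec (l.getD j "") (((pref ++ l.take j).count (l.getD j "") : Nat) : Int)) := by
  intro l
  induction l with
  | nil => intro pref j hj; simp at hj
  | cons n t ih =>
    intro pref j hj
    cases j with
    | zero => simp [pvGspec]
    | succ m =>
      have hm : m < t.length := by simpa using hj
      simp only [pvGspec, List.getElem?_cons_succ, List.getD_cons_succ, List.take_succ_cons]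
      rw [ih (pref ++ [n]) m hm]
      simp [List.append_assoc]

lemma pv_scatter (F : Nat → String) : ∀ (ps : List (Nat × String)) (r : List String),
    (∀ p ∈ ps, p.1 < r.length ∧ p.2 = F p.1) →
    (ps.foldl (fun r p => r.set p.1 p.2) r).length = r.length ∧
    ∀ j : Nat, (ps.foldl (fun r p => r.set p.1 p.2) r)[j]? =
      if j ∈ ps.map Prod.fst then some (F j) else r[j]? := by
  intro ps
  induction ps with
  | nil => intro r _; simp
  | cons p t ih =>
    intro r hp
    have hp1 : p.1 < r.length := (hp p (by simp)).1
    have hp2 : p.2 = F p.1 := (hp p (by simp)).2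
    have ht : ∀ q ∈ t, q.1 < (r.set p.1 p.2).length ∧ q.2 = F q.1 := by
      intro q hq
      exact ⟨by simpa using (hp q (by simp [hq])).1, (hp q (by simp [hq])).2⟩
    obtain ⟨hlen, hget⟩ := ih (r.set p.1 p.2) ht
    refine ⟨by simpa using hlen, ?_⟩
    intro j
    rw [List.foldl_cons, hget j]
    by_cases hjt : j ∈ t.map Prod.fst
    · simp [hjt]
    · by_cases hje : j = p.1
      · subst hje
        simp [hjt, hp1, hp2]
      · simp [hjt, hje, List.getElem?_set_ne (by omega : p.1 ≠ j)]

lemma pv_idxs_append (l : List String) (x name : String) :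
    pvIdxs (l ++ [x]) name = pvIdxs l name ++ (if x == name then [(l.length : Int)] else []) := by
  unfold pvIdxs
  rw [PySem.List.enumerate_append]
  simp only [PySem.List.enumerate_cons, PySem.List.enumerate_nil, List.map_append,
    List.filter_append, List.map_append]
  congr 1
  by_cases hx : x == name <;> simp [hx]

lemma pv_idxs_length (l : List String) (name : String) :
    (pvIdxs l name).length = l.count name := by
  induction l using List.reverseRecOn with
  | nil => rfl
  | append_singleton t x ih =>
    rw [pv_idxs_append]
    by_cases hx : x == name
    · have : x = name := by simpa using hx
      simp [this, ih, List.count_append]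
    · have : x ≠ name := by simpa using hx
      simp [hx, ih, List.count_append, this]

lemma pv_idxs_spec : ∀ (l : List String) (name : String) (k : Nat),
    k < (pvIdxs l name).length →
    ∃ j : Nat, (pvIdxs l name)[k]? = some ((j : Nat) : Int) ∧ j < l.length ∧
      l.getD j "" = name ∧ (l.take j).count name = k := by
  intro l
  induction l using List.reverseRecOn with
  | nil => intro name k hk; simp [pvIdxs] at hk
  | append_singleton t x ih =>
    intro name k hk
    rw [pv_idxs_append] at hk ⊢
    by_cases hlt : k < (pvIdxs t name).length
    · obtain ⟨j, h1, h2, h3, h4⟩ := ih name k hlt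
      refine ⟨j, ?_, by simp; omega, ?_, ?_⟩
      · rw [List.getElem?_append_left hlt]; exact h1
      · rw [List.getD_append _ _ _ _ h2]; exact h3
      · rw [List.take_append_of_le_length (by omega)]; exact h4
    · have hx : x == name := by
        by_contra hxx
        simp [hxx] at hk
        omega
      have hxe : x = name := by simpa using hx
      have hkeq : k = (pvIdxs t name).length := by
        simp [hx] at hk
        omega
      refine ⟨t.length, ?_, by simp, ?_, ?_⟩
      · rw [List.getElem?_append_right (by omega)]
        simp [hx, hkeq]
      · simp [hxe]
      · rw [List.take_append_of_le_length (by omega)]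
        simp [hkeq, pv_idxs_length]

lemma pv_idxs_cover (l : List String) (j : Nat) (hj : j < l.length) :
    ((j : Nat) : Int) ∈ pvIdxs l (l.getD j "") := by
  unfold pvIdxs
  refine List.mem_map.mpr ⟨(l.getD j "", (j : Int)), ?_, rfl⟩
  refine List.mem_filter.mpr ⟨?_, by simp⟩
  refine List.mem_map.mpr ⟨((j : Int), l.getD j ""), ?_, rfl⟩
  refine (PySem.List.mem_enumerate_iff _ _ _).mpr ⟨j, hj, ?_⟩
  simp [List.getElem?_eq_getElem hj]

lemma pv_B_eq (names : List String) (h : ∀ n ∈ names, n ≠ "") :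
    fix_same_column_name_py_alt names = fix_same_column_name_py names := by
  classical
  set n := names.length with hn
  set P : PySem.Dict String (List Int) :=
    (PySem.List.enumerate names).foldl
      (fun d p => d.modify p.2 [] (· ++ [p.1])) PySem.Dict.empty with hP
  -- the grouping dict, characterised
  have hPfold : P = ((PySem.List.enumerate names).map (fun p => (p.2, p.1))).foldl
      (fun d q => d.modify q.1 [] (· ++ [q.2])) PySem.Dict.empty := by
    rw [List.foldl_map]
  have hgetD : ∀ name, P.getD name [] = pvIdxs names name := by
    intro name
    rw [hPfold, PySem.Dict.getD_foldl_modify_append]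
    simp [pvIdxs]
  have hkeys : P.keys = PySem.Set.ofList names := by
    rw [hPfold]
    rw [PySem.Dict.keys_foldl_modify_key]
    simp [PySem.Set.update_nil_left, Function.comp_def, PySem.List.map_snd_enumerate]
  have hnodup : P.keys.Nodup := by
    rw [hkeys]; exact PySem.Set.nodup_ofList names
  have hitems : P.items = (PySem.Set.ofList names).map (fun k => (k, pvIdxs names k)) := by
    rw [PySem.Dict.items_eq_map_keys P hnodup [], hkeys]
    exact List.map_congr_left (fun k _ => by rw [hgetD k])
  -- B as one flat scatter pass
  set pairs : List (Nat × String) :=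
    P.items.flatMap (fun q => (PySem.List.enumerate q.2).map
      (fun z => (z.2.toNat, pvDec q.1 z.1))) with hpairs
  have hB : fix_same_column_name_py_alt names =
      pairs.foldl (fun r p => r.set p.1 p.2) (List.replicate n "") := by
    rw [hpairs, List.foldl_flatMap]
    simp only [List.foldl_map]
    rfl
  have hprops : ∀ p ∈ pairs, p.1 < (List.replicate n "").length ∧ p.2 = pvF names p.1 := by
    intro p hp
    rw [hpairs] at hp
    obtain ⟨q, hq, hpz⟩ := List.mem_flatMap.mp hp
    obtain ⟨z, hz, rfl⟩ := List.mem_map.mp hpz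
    rw [hitems] at hq
    obtain ⟨name, hname, rfl⟩ := List.mem_map.mp hq
    obtain ⟨k, hk, rfl⟩ := (PySem.List.mem_enumerate_iff _ _ _).mp hz
    obtain ⟨j, h1, h2, h3, h4⟩ := pv_idxs_spec names name k hk
    have hElem : (pvIdxs names name)[k] = ((j : Nat) : Int) := by
      rw [List.getElem?_eq_getElem hk] at h1
      exact Option.some_injective _ h1
    constructor
    · simp [hElem, hn]
      omega
    · simp only [hElem, zero_add, Int.toNat_natCast, pvF, h3, h4]
  have hcover : ∀ j : Nat, j < n → j ∈ pairs.map Prod.fst := by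
    intro j hj
    have hmem : ((j : Nat) : Int) ∈ pvIdxs names (names.getD j "") :=
      pv_idxs_cover names j hj
    obtain ⟨k, hk, hkj⟩ := List.getElem_of_mem hmem
    refine List.mem_map.mpr ⟨(((j : Nat) : Int).toNat, pvDec (names.getD j "") ((0 : Int) + (k : Int))), ?_, by simp⟩
    rw [hpairs]
    refine List.mem_flatMap.mpr ⟨(names.getD j "", pvIdxs names (names.getD j "")), ?_, ?_⟩
    · rw [hitems]
      refine List.mem_map.mpr ⟨names.getD j "", ?_, rfl⟩
      refine (PySem.Set.mem_ofList _ _).mpr ?_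
      have hgd : names.getD j "" = names[j] := by
        simp [List.getD, List.getElem?_eq_getElem hj]
      rw [hgd]
      exact List.getElem_mem hj
    · refine List.mem_map.mpr ⟨((0 : Int) + (k : Int), ((j : Nat) : Int)), ?_, by simp⟩
      refine (PySem.List.mem_enumerate_iff _ _ _).mpr ⟨k, hk, by rw [hkj]⟩
  obtain ⟨hlen, hget⟩ := pv_scatter (pvF names) pairs (List.replicate n "") hprops
  -- A elementwise
  have hA := pv_A_eq_gspec names h
  refine List.ext_getElem? (fun i => ?_)
  rw [hB, hget i]
  by_cases hi : i < n
  · rw [if_pos (hcover i hi), hA, pv_gspec_getElem? names [] i hi]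
    simp [pvF]
  · have h1 : (pvGspec [] names)[i]? = none := by
      rw [List.getElem?_eq_none_iff, pv_gspec_length]
      omega
    have h2 : (List.replicate n "")[i]? = none := by
      rw [List.getElem?_eq_none_iff]
      simp
      omega
    by_cases hm : i ∈ pairs.map Prod.fst
    · obtain ⟨p, hp, hpe⟩ := List.mem_map.mp hm
      have := (hprops p hp).1
      simp at this
      omega
    · rw [if_neg hm, hA, h1, h2]

-- ===== VERDICT (by name: the statement is the Claim_ definition above) =====
theorem fix_same_column_name_py_spec : Claim_equal_fix_same_column_name_py := by
  intro names _ hpre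
  unfold Spec_fix_same_column_name_py
  exact (pv_B_eq names hpre).symm
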